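-- pv_equiv track=rewrite | github.com/felixludos/babel-briefings | src/cleaning.py | article_contents
-- ===== SOURCE A (Python) =====
-- def article_contents(articles):
-- 	ids, errs = {}, set()
-- 	for art in articles:
-- 		payload = art['content']
-- 		ID = art['ID']
-- 		if ID in ids:
-- 			errs.add(ID)
-- 		ids[ID] = payload
-- 	return ids, errs
-- ===== SOURCE B (Python) =====
-- def article_contents(articles):
-- 	ids = {}
-- 	seen = []
-- 	for art in articles:
-- 		payload = art['content']
-- 		ID = art['ID']
-- 		ids[ID] = payload
-- 		seen.append(ID)
-- 	repeats = [x for i, x in enumerate(seen) if x in seen[:i]]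
-- 	return ids, set(repeats)
-- ===== Notes on version B (the rewrite author's own statement) =====
-- stated objective: alternative
-- what changed: The per-iteration dict-membership branch is removed: the loop only builds the id->content dict and the ordered ID list, and duplicates are computed afterwards in a separate pass that collects each ID occurring earlier in the list.
import Mathlib
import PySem

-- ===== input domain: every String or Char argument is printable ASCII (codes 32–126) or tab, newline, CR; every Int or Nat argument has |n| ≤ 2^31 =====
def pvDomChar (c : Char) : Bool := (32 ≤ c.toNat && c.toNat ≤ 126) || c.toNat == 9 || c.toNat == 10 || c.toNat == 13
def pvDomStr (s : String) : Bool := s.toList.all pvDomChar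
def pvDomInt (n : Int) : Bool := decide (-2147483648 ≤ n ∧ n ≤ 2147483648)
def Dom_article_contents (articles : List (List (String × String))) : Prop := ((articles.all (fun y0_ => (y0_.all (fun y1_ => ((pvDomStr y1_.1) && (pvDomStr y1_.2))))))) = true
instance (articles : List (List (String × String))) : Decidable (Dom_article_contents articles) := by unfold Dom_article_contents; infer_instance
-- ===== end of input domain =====

-- B removes A's per-iteration dict-membership branch: the loop only builds the dict and the ordered ID
-- list, and duplicate IDs are collected afterwards in a separate pass; same return value everywhere.

-- art['key'] on a dict argument (assoc list, first match); total form ONLY under Pre_ (key present)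
def pyLook (art : List (String × String)) (key : String) : String :=
  ((art.find? (fun p => p.1 == key)).map (fun p => p.2)).getD ""

-- ===== PORT A =====
def article_contents (articles : List (List (String × String))) : (List (String × String)) × List String :=
  let st := articles.foldl
    (fun (acc : PySem.Dict String String × PySem.Set String) art =>
      let payload := pyLook art "content"
      let ID := pyLook art "ID"
      let errs := if acc.1.contains ID then acc.2.add ID else acc.2
      (acc.1.insert ID payload, errs))
    (PySem.Dict.empty, PySem.Set.empty)
  (st.1.items, st.2)

-- ===== PORT B =====
def article_contents_alt (articles : List (List (String × String))) : (List (String × String)) × List String :=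
  let st := articles.foldl
    (fun (acc : PySem.Dict String String × List String) art =>
      let payload := pyLook art "content"
      let ID := pyLook art "ID"
      (acc.1.insert ID payload, acc.2 ++ [ID]))
    (PySem.Dict.empty, [])
  let seen := st.2
  let repeats := ((PySem.List.enumerate seen 0).filter
      (fun p => (PySem.List.slice seen none (some p.1)).contains p.2)).map (fun p => p.2)
  (st.1.items, PySem.Set.ofList repeats)

-- ===== PRECONDITION & SPEC =====
-- A raises KeyError on an article missing the 'content' or 'ID' key; exactly those inputs are excluded.
def Pre_article_contents (articles : List (List (String × String))) : Prop :=
  ∀ art ∈ articles, "content" ∈ art.map Prod.fst ∧ "ID" ∈ art.map Prod.fst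
instance (articles : List (List (String × String))) : Decidable (Pre_article_contents articles) := by
  unfold Pre_article_contents; infer_instance
def pvWitness_article_contents : (List (List (String × String))) :=
  [[("content", "hello"), ("ID", "a1")], [("ID", "a1"), ("content", "bye")]]

def Spec_article_contents (articles : List (List (String × String))) (out : (List (String × String)) × List String) : Prop := out = article_contents_alt articles
instance (articles : List (List (String × String))) (out : (List (String × String)) × List String) : Decidable (Spec_article_contents articles out) := by unfold Spec_article_contents; infer_instance

-- ===== CLAIM (what is proved, stated in full; the proofs are below) =====
def Claim_equal_article_contents : Prop := ∀ (articles : List (List (String × String))), Dom_article_contents articles → Pre_article_contents articles → Spec_article_contents articles (article_contents articles)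

-- ===== LEMMAS AND PROOFS =====

-- B's second pass as a function of the ID list
def dupsOf (l : List String) : PySem.Set String :=
  PySem.Set.ofList (((PySem.List.enumerate l 0).filter
      (fun p => (PySem.List.slice l none (some p.1)).contains p.2)).map (fun p => p.2))

lemma dupsOf_append (l : List String) (x : String) :
    dupsOf (l ++ [x]) = if l.contains x then (dupsOf l).add x else dupsOf l := by
  have hfc : (PySem.List.enumerate (l ++ [x]) 0).filter
      (fun p => (PySem.List.slice (l ++ [x]) none (some p.1)).contains p.2)
      = ((PySem.List.enumerate l 0).filter
          (fun p => (PySem.List.slice l none (some p.1)).contains p.2))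
        ++ (if l.contains x then [((l.length : Int), x)] else []) := by
    rw [PySem.List.enumerate_append, List.filter_append]
    congr 1
    · apply List.filter_congr
      intro p hp
      rcases (PySem.List.mem_enumerate_iff _ _ _).1 hp with ⟨k, hk, rfl⟩
      simp only [zero_add]
      rw [PySem.List.slice_to_natCast, PySem.List.slice_to_natCast,
          List.take_append_of_le_length (le_of_lt hk)]
    · rw [PySem.List.enumerate_cons, PySem.List.enumerate_nil]
      simp only [zero_add, List.filter, PySem.List.slice_to_natCast, List.take_left]
      split <;> simp_all
  unfold dupsOf
  rw [hfc, List.map_append]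
  split
  · simp only [List.map]
    rw [PySem.Set.ofList_eq_foldl, PySem.Set.ofList_eq_foldl, List.foldl_append]
    rfl
  · simp

lemma loop_eq (arts : List (List (String × String))) :
    ∀ (d : PySem.Dict String String) (e : PySem.Set String) (l : List String),
    (∀ x, d.contains x = l.contains x) → e = dupsOf l →
    arts.foldl
      (fun (acc : PySem.Dict String String × PySem.Set String) art =>
        let payload := pyLook art "content"
        let ID := pyLook art "ID"
        let errs := if acc.1.contains ID then acc.2.add ID else acc.2
        (acc.1.insert ID payload, errs)) (d, e)
    = (fun (p : PySem.Dict String String × List String) => (p.1, dupsOf p.2))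
        (arts.foldl
          (fun (acc : PySem.Dict String String × List String) art =>
            let payload := pyLook art "content"
            let ID := pyLook art "ID"
            (acc.1.insert ID payload, acc.2 ++ [ID])) (d, l)) := by
  induction arts with
  | nil => intro d e l _ he; simp [he]
  | cons a as ih =>
    intro d e l hinv he
    simp only [List.foldl_cons]
    apply ih
    · intro x
      rw [PySem.Dict.contains_insert]
      simp [hinv x, Bool.or_comm]
      by_cases h : x = pyLook a "ID" <;> simp [h]
    · rw [dupsOf_append, ← hinv, he]

-- ===== VERDICT (by name: the statement is the Claim_ definition above) =====
theorem article_contents_spec : Claim_equal_article_contents := by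
  intro articles _ _
  unfold Spec_article_contents article_contents article_contents_alt
  rw [loop_eq articles PySem.Dict.empty PySem.Set.empty []
    (fun x => by simp [PySem.Dict.contains_empty]) rfl]
  rfl
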